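-- pv_equiv track=rewrite | github.com/francescoqqqq/Scacchi | backend/prova.py | format_moves
-- ===== SOURCE A (Python) =====
-- def format_moves(moves):
--     """
--     Formatta le mosse in una visualizzazione ordinata per numero
--
--     Args:
--         moves (list): Lista di mosse
--
--     Returns:
--         str: Stringa formattata con le mosse numerate
--     """
--     formatted_output = ""
--     for i, move in enumerate(moves, 1):
--         if i % 2 == 1:  # Mosse bianche
--             formatted_output += f"{(i+1)//2}. {move} "
--         else:  # Mosse nere
--             formatted_output += f"{move}\n"
--
--     # Assicurati di andare a capo alla fine se necessario
--     if len(moves) % 2 == 1: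
--         formatted_output += "\n"
--
--     return formatted_output
-- ===== SOURCE B (Python) =====
-- def format_moves(moves):
--     """Pair-at-a-time reformulation: build one line per (white, black) move pair
--     and join the lines, instead of switching on parity per move."""
--     lines = []
--     number = 1
--     i = 0
--     while i < len(moves):
--         if i + 1 < len(moves):
--             lines.append(f"{number}. {moves[i]} {moves[i + 1]}\n")
--         else:
--             lines.append(f"{number}. {moves[i]} \n")
--         number += 1
--         i += 2
--     return "".join(lines)
-- ===== Notes on version B (the rewrite author's own statement) =====
-- stated objective: alternative
-- what changed: Replaces the per-move parity-switching loop (with a post-loop newline fixup for odd length) by a pair-at-a-time loop that emits one complete numbered line per move pair and joins the lines.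
import Mathlib
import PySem

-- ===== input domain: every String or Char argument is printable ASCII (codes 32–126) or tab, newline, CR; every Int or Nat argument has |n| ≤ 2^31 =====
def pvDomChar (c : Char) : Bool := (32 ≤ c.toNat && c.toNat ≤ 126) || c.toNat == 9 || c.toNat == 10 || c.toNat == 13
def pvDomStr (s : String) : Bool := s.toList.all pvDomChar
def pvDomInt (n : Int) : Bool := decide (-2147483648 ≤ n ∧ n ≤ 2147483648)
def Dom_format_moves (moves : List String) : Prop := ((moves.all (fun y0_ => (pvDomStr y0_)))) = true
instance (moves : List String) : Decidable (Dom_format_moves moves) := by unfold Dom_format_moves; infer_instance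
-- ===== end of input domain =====

-- B reformulates A's per-move parity loop as a pair-at-a-time loop (one numbered line per move pair, joined at the end); objective: alternative decomposition, same cost.


-- ===== PORT A =====
-- one iteration of A's loop body: index i (from enumerate(moves, 1)) decides white/black
def fmStepA (acc : List Char) (p : Int × String) : List Char :=
  if PySem.Int.mod p.1 2 == 1 then
    acc ++ PySem.Int.toChars (PySem.Int.floordiv (p.1 + 1) 2) ++ '.' :: ' ' :: p.2.toList ++ [' ']
  else
    acc ++ p.2.toList ++ ['\n']

def format_moves (moves : List String) : String :=
  let body := (PySem.List.enumerate moves 1).foldl fmStepA []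
  String.ofList (if PySem.Int.mod ((moves.length : Int)) 2 == 1 then body ++ ['\n'] else body)

-- ===== PORT B =====
-- B's pair loop: one complete line per (white, black?) pair, then "".join
def fmLines (n : Int) : List String → List String
  | [] => []
  | [w] => [String.ofList (PySem.Int.toChars n ++ '.' :: ' ' :: w.toList ++ [' ', '\n'])]
  | w :: b :: rest =>
      String.ofList (PySem.Int.toChars n ++ '.' :: ' ' :: w.toList ++ ' ' :: b.toList ++ ['\n'])
        :: fmLines (n + 1) rest

def format_moves_alt (moves : List String) : String :=
  PySem.Str.join "" (fmLines 1 moves)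

-- ===== PRECONDITION & SPEC =====
def Spec_format_moves (moves : List String) (out : String) : Prop := out = format_moves_alt moves
instance (moves : List String) (out : String) : Decidable (Spec_format_moves moves out) := by unfold Spec_format_moves; infer_instance

-- ===== CLAIM (what is proved, stated in full; the proofs are below) =====
def Claim_equal_format_moves : Prop := ∀ (moves : List String), Dom_format_moves moves → Spec_format_moves moves (format_moves moves)

-- ===== LEMMAS AND PROOFS =====
lemma flatten_intersperse_nil (parts : List (List Char)) :
    (List.intersperse ([] : List Char) parts).flatten = parts.flatten := by
  induction parts with
  | nil => simp
  | cons a r ih => cases r <;> simp_all [List.intersperse]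

lemma mod_two_cast (m : Nat) : PySem.Int.mod (m : Int) 2 = ((m % 2 : Nat) : Int) := by
  have h : (2 : Int) = ((2 : Nat) : Int) := rfl
  rw [h, PySem.Int.mod_natCast]

lemma fm_key : ∀ (ms : List String) (n : Nat) (acc : List Char),
    (PySem.List.enumerate ms (2 * (n : Int) + 1)).foldl fmStepA acc
      ++ (if ms.length % 2 == 1 then ['\n'] else ([] : List Char))
    = acc ++ ((fmLines ((n : Int) + 1) ms).map String.toList).flatten
  | [], n, acc => by simp [PySem.List.enumerate_nil, fmLines]
  | [w], n, acc => by
    have h1 : (2 * (n : Int) + 1) = ((2 * n + 1 : Nat) : Int) := by push_cast; ring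
    have h2 : (2 * (n : Int) + 1 + 1) = ((2 * n + 2 : Nat) : Int) := by push_cast; ring
    have hmod : PySem.Int.mod (2 * (n : Int) + 1) 2 = 1 := by
      rw [h1, mod_two_cast]; omega
    have hdiv : PySem.Int.floordiv (2 * (n : Int) + 1 + 1) 2 = (n : Int) + 1 := by
      rw [h2]
      have h3 : (2 : Int) = ((2 : Nat) : Int) := rfl
      rw [h3, PySem.Int.floordiv_natCast]; push_cast; omega
    simp only [PySem.List.enumerate_cons, PySem.List.enumerate_nil, List.foldl_cons,
      List.foldl_nil, fmStepA, hmod, hdiv]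
    simp [fmLines]
  | w :: b :: rest, n, acc => by
    have h1 : (2 * (n : Int) + 1) = ((2 * n + 1 : Nat) : Int) := by push_cast; ring
    have h2 : (2 * (n : Int) + 1 + 1) = ((2 * n + 2 : Nat) : Int) := by push_cast; ring
    have hmodw : PySem.Int.mod (2 * (n : Int) + 1) 2 = 1 := by
      rw [h1, mod_two_cast]; omega
    have hmodb : PySem.Int.mod (2 * (n : Int) + 1 + 1) 2 = 0 := by
      rw [h2, mod_two_cast]; omega
    have hdiv : PySem.Int.floordiv (2 * (n : Int) + 1 + 1) 2 = (n : Int) + 1 := by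
      rw [h2]
      have h3 : (2 : Int) = ((2 : Nat) : Int) := rfl
      rw [h3, PySem.Int.floordiv_natCast]; push_cast; omega
    have hlen : ((w :: b :: rest).length % 2 == 1) = (rest.length % 2 == 1) := by
      have : (w :: b :: rest).length % 2 = rest.length % 2 := by simp; omega
      rw [this]
    have hs : (2 * (n : Int) + 1) + 1 + 1 = 2 * ((n + 1 : Nat) : Int) + 1 := by push_cast; ring
    rw [PySem.List.enumerate_cons, PySem.List.enumerate_cons, List.foldl_cons, List.foldl_cons,
        hs, hlen,
        fm_key rest (n + 1) (fmStepA (fmStepA acc (2 * (n : Int) + 1, w)) (2 * (n : Int) + 1 + 1, b))]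
    simp only [fmStepA, hmodw, hmodb, hdiv]
    simp [fmLines]

-- ===== VERDICT (by name: the statement is the Claim_ definition above) =====
theorem format_moves_spec : Claim_equal_format_moves := by
  intro moves _
  unfold Spec_format_moves format_moves format_moves_alt
  apply String.toList_inj.mp
  have key := fm_key moves 0 []
  simp only [Nat.cast_zero, mul_zero, zero_add, List.nil_append] at key
  have hjoin : (PySem.Str.join "" (fmLines 1 moves)).toList
      = ((fmLines 1 moves).map String.toList).flatten := by
    simp [PySem.Chars.join, List.intercalate, flatten_intersperse_nil]
  have hcond : (PySem.Int.mod ((moves.length : Int)) 2 == 1) = (moves.length % 2 == 1) := by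
    rw [mod_two_cast]
    rcases Nat.mod_two_eq_zero_or_one moves.length with h | h <;> simp [h]
  rw [hjoin, ← key, hcond]
  split_ifs with h <;> simp
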